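-- pv_equiv track=rewrite | github.com/onooff/algorithm | boj/bj16953.py | go
-- ===== SOURCE A (Python) =====
-- def go(b, a, cnt):
--     if b == a:
--         return cnt
--     if b % 10 == 1:
--         return go((b - 1) // 10, a, cnt + 1)
--     if b > 0 and b % 2 == 0:
--         return go(b // 2, a, cnt + 1)
--     return -1
-- ===== SOURCE B (Python) =====
-- def _step(b):
--     if b % 10 == 1:
--         return (b - 1) // 10
--     if b > 0 and b % 2 == 0:
--         return b // 2
--     return None
--
-- def go(b, a, cnt):
--     while b != a:
--         nb = _step(b)
--         if nb is None:
--             return -1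
--         b = nb
--         cnt += 1
--     return cnt
-- ===== Notes on version B (the rewrite author's own statement) =====
-- stated objective: idiomatic
-- what changed: Tail recursion becomes an iterative while-loop driven by a separate _step helper that returns the next value or None; the loop accumulates the count instead of recursing.
import Mathlib
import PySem

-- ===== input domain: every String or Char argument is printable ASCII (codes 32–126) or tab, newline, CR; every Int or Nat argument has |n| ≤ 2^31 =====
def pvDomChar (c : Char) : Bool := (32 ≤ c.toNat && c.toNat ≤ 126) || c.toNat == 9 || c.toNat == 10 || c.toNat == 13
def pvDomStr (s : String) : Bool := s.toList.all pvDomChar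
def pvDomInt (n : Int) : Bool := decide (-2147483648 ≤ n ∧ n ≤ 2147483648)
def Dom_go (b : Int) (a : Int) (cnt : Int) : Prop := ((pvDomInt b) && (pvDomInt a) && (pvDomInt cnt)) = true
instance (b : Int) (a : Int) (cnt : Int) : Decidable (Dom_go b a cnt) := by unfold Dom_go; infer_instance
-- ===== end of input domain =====

-- B = iterative reformulation via an Option-returning step helper; objective: idiomatic, same cost.

-- termination helpers for the ports (cited by name in decreasing_by)
theorem pvDec1 (b : Int) (h : PySem.Int.mod b 10 = 1) :
    (PySem.Int.floordiv (b - 1) 10).natAbs < b.natAbs := by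
  rw [PySem.Int.floordiv_eq_ediv_of_pos (by norm_num)]
  rw [PySem.Int.mod_eq_emod_of_pos (by norm_num)] at h
  omega

theorem pvDec2 (b : Int) (h1 : 0 < b) (h2 : PySem.Int.mod b 2 = 0) :
    (PySem.Int.floordiv b 2).natAbs < b.natAbs := by
  rw [PySem.Int.floordiv_eq_ediv_of_pos (by norm_num)]
  rw [PySem.Int.mod_eq_emod_of_pos (by norm_num)] at h2
  omega

-- ===== PORT A =====
def go (b : Int) (a : Int) (cnt : Int) : Int :=
  if b = a then cnt
  else if h1 : PySem.Int.mod b 10 = 1 then go (PySem.Int.floordiv (b - 1) 10) a (cnt + 1)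
  else if h2 : 0 < b ∧ PySem.Int.mod b 2 = 0 then go (PySem.Int.floordiv b 2) a (cnt + 1)
  else -1
termination_by b.natAbs
decreasing_by
  · exact pvDec1 b h1
  · exact pvDec2 b h2.1 h2.2

-- ===== PORT B =====
-- B's helper _step: the next value, or none when stuck
def pyStep (b : Int) : Option Int :=
  if PySem.Int.mod b 10 = 1 then some (PySem.Int.floordiv (b - 1) 10)
  else if 0 < b ∧ PySem.Int.mod b 2 = 0 then some (PySem.Int.floordiv b 2)
  else none

theorem pvStepDec (b nb : Int) (h : pyStep b = some nb) : nb.natAbs < b.natAbs := by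
  unfold pyStep at h
  split_ifs at h with h1 h2
  · cases h; exact pvDec1 b h1
  · cases h; exact pvDec2 b h2.1 h2.2

-- B's while-loop, with cnt as the accumulator
def go_alt (b : Int) (a : Int) (cnt : Int) : Int :=
  if b = a then cnt
  else
    match h : pyStep b with
    | none => -1
    | some nb => go_alt nb a (cnt + 1)
termination_by b.natAbs
decreasing_by exact pvStepDec b nb h

-- ===== PRECONDITION & SPEC =====
def Spec_go (b : Int) (a : Int) (cnt : Int) (out : Int) : Prop := out = go_alt b a cnt
instance (b : Int) (a : Int) (cnt : Int) (out : Int) : Decidable (Spec_go b a cnt out) := by unfold Spec_go; infer_instance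

-- ===== CLAIM (what is proved, stated in full; the proofs are below) =====
def Claim_equal_go : Prop := ∀ (b : Int) (a : Int) (cnt : Int), Dom_go b a cnt → Spec_go b a cnt (go b a cnt)

-- ===== LEMMAS AND PROOFS =====
theorem go_eq_alt (n : Nat) : ∀ (b a cnt : Int), b.natAbs = n → go b a cnt = go_alt b a cnt := by
  induction n using Nat.strong_induction_on with
  | _ n ih =>
    intro b a cnt hn
    rw [go, go_alt]
    by_cases hba : b = a
    · simp [hba]
    · simp only [hba, if_false]
      cases h : pyStep b with
      | none =>
        unfold pyStep at h
        split_ifs at h with h1 h2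
        rw [dif_neg h1, dif_neg h2]
      | some nb =>
        have hd := pvStepDec b nb h
        unfold pyStep at h
        split_ifs at h with h1 h2
        · cases h
          rw [dif_pos h1]
          exact (ih _ (hn ▸ hd) _ a (cnt + 1) rfl).trans rfl
        · cases h
          rw [dif_neg h1, dif_pos h2]
          exact (ih _ (hn ▸ hd) _ a (cnt + 1) rfl).trans rfl

-- ===== VERDICT (by name: the statement is the Claim_ definition above) =====
theorem go_spec : Claim_equal_go := by
  intro b a cnt _
  unfold Spec_go
  exact go_eq_alt b.natAbs b a cnt rfl
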